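-- pv_equiv track=rewrite | github.com/Jack-1D/Special-Project | flask案例/module/DeliveryDateForecast/OutputPrediction/Function.py | FillNextDay_Mode3
-- ===== SOURCE A (Python) =====
-- def FillNextDay_Mode3(i, future_machine_list, future_machine_limit_list, final_index):
--     if future_machine_list[i + 1] < list(future_machine_limit_list[i + 1].values())[0]['number']:
--         if i+1 > final_index:
--             final_index = i + 1
--         future_machine_list[i + 1] = future_machine_list[i + 1] + 1
--         return final_index
--     else:
--         return FillNextDay_Mode3(i + 1, future_machine_list, future_machine_limit_list, final_index)
-- ===== SOURCE B (Python) =====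
-- def FillNextDay_Mode3(i, future_machine_list, future_machine_limit_list, final_index):
--     # Iterative scan: walk forward from i+1 until the first day under capacity,
--     # increment that day's count and return the running maximum index.
--     def is_open(j):
--         limit = next(iter(future_machine_limit_list[j].values()))['number']
--         return future_machine_list[j] < limit
--     j = i + 1
--     while not is_open(j):
--         j += 1
--     future_machine_list[j] += 1
--     return max(final_index, j)
-- ===== Notes on version B (the rewrite author's own statement) =====
-- stated objective: idiomatic
-- what changed: Replaces the tail recursion (which re-passes all four arguments each call and can hit Python's recursion limit) with a plain while-loop over a local is_open(j) predicate (capacity via next(iter(...))) followed by max(final_index, j), instead of threading final_index through recursive calls.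
import Mathlib
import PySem

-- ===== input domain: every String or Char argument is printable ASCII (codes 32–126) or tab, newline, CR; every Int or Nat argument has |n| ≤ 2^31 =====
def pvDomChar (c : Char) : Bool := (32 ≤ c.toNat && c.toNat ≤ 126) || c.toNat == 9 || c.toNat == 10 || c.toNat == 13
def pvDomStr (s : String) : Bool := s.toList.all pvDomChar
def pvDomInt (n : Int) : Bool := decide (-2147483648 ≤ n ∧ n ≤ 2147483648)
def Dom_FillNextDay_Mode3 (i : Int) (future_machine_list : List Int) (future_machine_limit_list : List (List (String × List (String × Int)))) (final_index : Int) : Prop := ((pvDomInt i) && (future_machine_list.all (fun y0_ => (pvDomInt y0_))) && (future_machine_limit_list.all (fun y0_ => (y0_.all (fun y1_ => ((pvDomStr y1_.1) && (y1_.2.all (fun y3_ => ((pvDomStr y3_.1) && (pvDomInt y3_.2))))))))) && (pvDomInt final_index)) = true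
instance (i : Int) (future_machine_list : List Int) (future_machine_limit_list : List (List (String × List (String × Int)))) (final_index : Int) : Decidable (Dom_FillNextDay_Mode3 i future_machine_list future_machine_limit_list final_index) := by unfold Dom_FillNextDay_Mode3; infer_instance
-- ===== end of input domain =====

-- B replaces A's tail recursion (threading final_index through every call) with a while-loop over a
-- local is_open predicate plus max(); equivalence is about the RETURN value (both Pythons also
-- perform the identical in-place increment of future_machine_list at the found index).

-- ===== PORT A =====
-- A's capacity lookup list(d.values())[0]['number'] at (possibly negative) index j;
-- none = IndexError/KeyError. Values of a dict in insertion order = map Prod.snd; lookup = first match.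
def capLookup (future_machine_limit_list : List (List (String × List (String × Int)))) (j : Int) : Option Int :=
  (PySem.List.pyGet? future_machine_limit_list j).bind fun d =>
    ((d.map Prod.snd).head?).bind fun inner =>
      (inner.find? (fun p => p.1 == "number")).map Prod.snd

-- A's recursion on i; fuel only makes the recursion total (none = Python raises).
def goA (fuel : Nat) (i : Int) (future_machine_list : List Int) (future_machine_limit_list : List (List (String × List (String × Int)))) (final_index : Int) : Option Int :=
  match fuel with
  | 0 => none
  | f + 1 =>
    match PySem.List.pyGet? future_machine_list (i + 1), capLookup future_machine_limit_list (i + 1) with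
    | some v, some c =>
      if v < c then some (if i + 1 > final_index then i + 1 else final_index)
      else goA f (i + 1) future_machine_list future_machine_limit_list final_index
    | _, _ => none

def FillNextDay_Mode3 (i : Int) (future_machine_list : List Int) (future_machine_limit_list : List (List (String × List (String × Int)))) (final_index : Int) : Int :=
  (goA (2 * future_machine_list.length + 1) i future_machine_list future_machine_limit_list final_index).getD 0

-- ===== PORT B =====
-- B's local predicate is_open(j): limit = next(iter(d.values()))['number']; fml[j] < limit.
-- none = the IndexError/KeyError Python would raise inside is_open.
def isOpenB (future_machine_list : List Int) (future_machine_limit_list : List (List (String × List (String × Int)))) (j : Int) : Option Bool :=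
  match PySem.List.pyGet? future_machine_limit_list j with
  | none => none
  | some d =>
    match d.head? with
    | none => none
    | some kv =>
      match kv.2.find? (fun p => p.1 == "number") with
      | none => none
      | some p =>
        match PySem.List.pyGet? future_machine_list j with
        | none => none
        | some v => some (decide (v < p.2))

-- B's while-loop advancing j; fuel only makes the loop total.
def whileB (fuel : Nat) (future_machine_list : List Int) (future_machine_limit_list : List (List (String × List (String × Int)))) (j : Int) : Option Int :=
  match fuel with
  | 0 => none
  | f + 1 =>
    match isOpenB future_machine_list future_machine_limit_list j with
    | none => none
    | some b => if b then some j else whileB f future_machine_list future_machine_limit_list (j + 1)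

def FillNextDay_Mode3_alt (i : Int) (future_machine_list : List Int) (future_machine_limit_list : List (List (String × List (String × Int)))) (final_index : Int) : Int :=
  match whileB (2 * future_machine_list.length + 1) future_machine_list future_machine_limit_list (i + 1) with
  | some j => max final_index j
  | none => 0

-- ===== PRECONDITION & SPEC =====
-- the value of the loop/recursion condition at index j (none = Python would raise there)
def stepVal (future_machine_list : List Int) (future_machine_limit_list : List (List (String × List (String × Int)))) (j : Int) : Option Bool :=
  match PySem.List.pyGet? future_machine_list j, capLookup future_machine_limit_list j with
  | some v, some c => some (v < c)
  | _, _ => none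

-- Pre_ = exactly the inputs on which the Python A returns (the walk from i+1 reaches, within list
-- bounds, an index whose condition is True before any index raises IndexError/KeyError).
def Pre_FillNextDay_Mode3 (i : Int) (future_machine_list : List Int) (future_machine_limit_list : List (List (String × List (String × Int)))) (final_index : Int) : Prop :=
  ∃ k ∈ List.range (2 * future_machine_list.length + 1),
    (∀ m ∈ List.range k, stepVal future_machine_list future_machine_limit_list (i + 1 + m) = some false) ∧
    stepVal future_machine_list future_machine_limit_list (i + 1 + k) = some true
instance (i : Int) (future_machine_list : List Int) (future_machine_limit_list : List (List (String × List (String × Int)))) (final_index : Int) : Decidable (Pre_FillNextDay_Mode3 i future_machine_list future_machine_limit_list final_index) := by unfold Pre_FillNextDay_Mode3; infer_instance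

def pvWitness_FillNextDay_Mode3 : Int × List Int × (List (List (String × List (String × Int)))) × Int :=
  (-1, [0], [[("m", [("number", 5)])]], 0)

def Spec_FillNextDay_Mode3 (i : Int) (future_machine_list : List Int) (future_machine_limit_list : List (List (String × List (String × Int)))) (final_index : Int) (out : Int) : Prop := out = FillNextDay_Mode3_alt i future_machine_list future_machine_limit_list final_index
instance (i : Int) (future_machine_list : List Int) (future_machine_limit_list : List (List (String × List (String × Int)))) (final_index : Int) (out : Int) : Decidable (Spec_FillNextDay_Mode3 i future_machine_list future_machine_limit_list final_index out) := by unfold Spec_FillNextDay_Mode3; infer_instance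

-- ===== CLAIM =====
def Claim_equal_FillNextDay_Mode3 : Prop := ∀ (i : Int) (future_machine_list : List Int) (future_machine_limit_list : List (List (String × List (String × Int)))) (final_index : Int), Dom_FillNextDay_Mode3 i future_machine_list future_machine_limit_list final_index → Pre_FillNextDay_Mode3 i future_machine_list future_machine_limit_list final_index → Spec_FillNextDay_Mode3 i future_machine_list future_machine_limit_list final_index (FillNextDay_Mode3 i future_machine_list future_machine_limit_list final_index)

-- ===== LEMMAS AND PROOFS =====
-- B's loop condition computes exactly A's condition (same lookups, decidable comparison).
theorem isOpenB_eq_stepVal (future_machine_list : List Int) (future_machine_limit_list : List (List (String × List (String × Int)))) (j : Int) :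
    isOpenB future_machine_list future_machine_limit_list j = stepVal future_machine_list future_machine_limit_list j := by
  unfold isOpenB stepVal capLookup
  cases PySem.List.pyGet? future_machine_limit_list j with
  | none => cases PySem.List.pyGet? future_machine_list j <;> rfl
  | some d =>
    cases d with
    | nil => cases PySem.List.pyGet? future_machine_list j <;> rfl
    | cons kv rest =>
      cases h : kv.2.find? (fun p => p.1 == "number") with
      | none => cases PySem.List.pyGet? future_machine_list j <;> simp [h]
      | some p => cases PySem.List.pyGet? future_machine_list j <;> simp [h]

-- A's recursion carrying final_index equals B's bare scan followed by max with final_index.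
theorem goA_eq_whileB : ∀ (fuel : Nat) (i : Int) (future_machine_list : List Int) (future_machine_limit_list : List (List (String × List (String × Int)))) (final_index : Int),
    goA fuel i future_machine_list future_machine_limit_list final_index
      = (whileB fuel future_machine_list future_machine_limit_list (i + 1)).map
          (fun j => max final_index j) := by
  intro fuel
  induction fuel with
  | zero => intro i fml flim fin; rfl
  | succ f ih =>
    intro i fml flim fin
    have hs := isOpenB_eq_stepVal fml flim (i + 1)
    simp only [goA, whileB]
    cases h1 : PySem.List.pyGet? fml (i + 1) <;>
      cases h2 : capLookup flim (i + 1) <;>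
      simp only [stepVal, h1, h2] at hs <;> rw [hs]
    · rfl
    · rfl
    · rfl
    · rename_i v c
      by_cases hvc : v < c
      · simp only [hvc, decide_true, if_pos, Option.map_some, gt_iff_lt,
          Option.some.injEq, Int.max_def]
        split_ifs <;> omega
      · simp only [hvc, decide_false, if_false, Bool.false_eq_true]
        exact ih (i + 1) fml flim fin

-- ===== VERDICT =====
theorem FillNextDay_Mode3_spec : Claim_equal_FillNextDay_Mode3 := by
  intro i fml flim fin _ _
  unfold Spec_FillNextDay_Mode3 FillNextDay_Mode3 FillNextDay_Mode3_alt
  rw [goA_eq_whileB]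
  cases whileB (2 * fml.length + 1) fml flim (i + 1) <;> rfl
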